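-- pv_equiv track=rewrite | github.com/MrChepe09/Competitive-Programming-Codes | Codechef May CookOff 2020/CHEFRECP.py | chefrecp
-- ===== SOURCE A (Python) =====
-- def chefrecp(n, a):
--   dicti = {}
--   for i in range(n):
--     if(a[i] not in dicti):
--       dicti[a[i]] = 1
--     elif(a[i] in dicti):
--       if(a[i] == a[i-1]):
--         dicti[a[i]] += 1
--       else:
--         return "NO"
--   done = []
--   for i in dicti:
--     if(dicti[i] not in done):
--       done.append(dicti[i])
--     else:
--       return "NO"
--   return "YES"
-- ===== SOURCE B (Python) =====
-- from itertools import groupby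
--
-- def chefrecp(n, a):
--     vals = [a[i] for i in range(n)]
--     runs = [(v, sum(1 for _ in g)) for v, g in groupby(vals)]
--     values = [v for v, _ in runs]
--     lengths = [c for _, c in runs]
--     if len(set(values)) != len(values) or len(set(lengths)) != len(lengths):
--         return "NO"
--     return "YES"
-- ===== Notes on version B (the rewrite author's own statement) =====
-- stated objective: simpler
-- what changed: A's single detect-while-counting scan (dict of counts with an adjacent-previous check, then a membership loop over the counts) is replaced by an explicit run-length decomposition of the value sequence (itertools.groupby) followed by two independent distinctness checks, one on the run values and one on the run lengths.
-- outside the precondition, e.g. on chefrecp(5, [1, 2, 1]): A returns 'NO', B raises IndexError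
import Mathlib
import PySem

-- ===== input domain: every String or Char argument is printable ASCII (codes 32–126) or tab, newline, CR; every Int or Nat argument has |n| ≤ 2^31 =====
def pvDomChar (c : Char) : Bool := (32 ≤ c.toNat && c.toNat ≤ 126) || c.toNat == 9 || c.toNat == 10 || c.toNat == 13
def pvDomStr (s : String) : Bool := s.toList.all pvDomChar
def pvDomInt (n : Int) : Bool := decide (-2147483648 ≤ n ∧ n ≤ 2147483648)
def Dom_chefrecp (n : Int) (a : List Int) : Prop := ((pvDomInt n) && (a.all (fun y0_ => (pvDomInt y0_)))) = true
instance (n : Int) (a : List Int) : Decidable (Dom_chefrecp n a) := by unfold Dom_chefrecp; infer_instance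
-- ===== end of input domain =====

-- B replaces A's detect-while-counting dict scan by an explicit run-length decomposition
-- (itertools.groupby) followed by two independent distinctness checks; objective: simpler.

-- ===== PORT A =====
-- first Python loop: builds dicti; none encodes the early "return "NO"".
-- a[i] / a[i-1] are in range on every executed step for inputs inside Pre_ (n ≤ len a);
-- the '.getD 0' defaults are never reached there.
def chefrecpLoop1 (a : List Int) : List Int → PySem.Dict Int Int → Option (PySem.Dict Int Int)
  | [], d => some d
  | i :: rest, d =>
    if d.contains ((PySem.List.pyGet? a i).getD 0) = false then
      chefrecpLoop1 a rest (d.insert ((PySem.List.pyGet? a i).getD 0) 1)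
    else
      if (PySem.List.pyGet? a i).getD 0 = (PySem.List.pyGet? a (i - 1)).getD 0 then
        chefrecpLoop1 a rest (d.modify ((PySem.List.pyGet? a i).getD 0) 0 (· + 1))
      else
        none

-- second Python loop: over the dict's keys with the 'done' list.
def chefrecpLoop2 (d : PySem.Dict Int Int) : List Int → List Int → String
  | [], _ => "YES"
  | k :: rest, done =>
    if d.getD k 0 ∈ done then "NO" else chefrecpLoop2 d rest (done ++ [d.getD k 0])

def chefrecp (n : Int) (a : List Int) : String :=
  match chefrecpLoop1 a (PySem.List.pyRange 0 n 1) PySem.Dict.empty with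
  | none => "NO"
  | some d => chefrecpLoop2 d d.keys []

-- ===== PORT B =====
-- itertools.groupby over a list of ints, as (value, run length) pairs.
def runsAux (v : Int) (c : Int) : List Int → List (Int × Int)
  | [] => [(v, c)]
  | x :: xs => if x = v then runsAux v (c + 1) xs else (v, c) :: runsAux x 1 xs

def pyGroupRuns : List Int → List (Int × Int)
  | [] => []
  | x :: xs => runsAux x 1 xs

def chefrecp_alt (n : Int) (a : List Int) : String :=
  let vals := (PySem.List.pyRange 0 n 1).map (fun i => (PySem.List.pyGet? a i).getD 0)
  let runs := pyGroupRuns vals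
  let values := runs.map Prod.fst
  let lengths := runs.map Prod.snd
  if (PySem.Set.ofList values).length ≠ values.length ∨
     (PySem.Set.ofList lengths).length ≠ lengths.length then "NO" else "YES"

-- ===== PRECONDITION & SPEC =====
-- Pre_ excludes n > len(a): there Python raises IndexError (B always, A unless its scan
-- hits a non-adjacent repeated value first and returns "NO" before reaching index len(a)).
def Pre_chefrecp (n : Int) (a : List Int) : Prop := n ≤ (a.length : Int)
instance (n : Int) (a : List Int) : Decidable (Pre_chefrecp n a) := by unfold Pre_chefrecp; infer_instance

def pvWitness_chefrecp : Int × List Int := (4, [7, 7, 7, 5])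

def Spec_chefrecp (n : Int) (a : List Int) (out : String) : Prop := out = chefrecp_alt n a
instance (n : Int) (a : List Int) (out : String) : Decidable (Spec_chefrecp n a out) := by unfold Spec_chefrecp; infer_instance

-- ===== CLAIM (what is proved, stated in full; the proofs are below) =====
def Claim_equal_chefrecp : Prop := ∀ (n : Int) (a : List Int), Dom_chefrecp n a → Pre_chefrecp n a → Spec_chefrecp n a (chefrecp n a)

-- ===== LEMMAS AND PROOFS =====

-- A's first loop re-expressed over the list of fetched values, threading the previous value.
def listLoop (prev : Int) : List Int → PySem.Dict Int Int → Option (PySem.Dict Int Int)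
  | [], d => some d
  | x :: xs, d =>
    if d.contains x = false then listLoop x xs (d.insert x 1)
    else if x = prev then listLoop x xs (d.modify x 0 (· + 1))
    else none

theorem runsAux_fst_mem (v : Int) (c : Int) (ys : List Int) :
    v ∈ (runsAux v c ys).map Prod.fst := by
  induction ys generalizing c with
  | nil => simp [runsAux]
  | cons y ys ih =>
    by_cases h : y = v <;> simp [runsAux, h, ih]

theorem map_overwrite_id (rs : List (Int × Int)) (k : Int) (v : Int)
    (h : k ∉ rs.map Prod.fst) :
    rs.map (fun p => if (p.1 == k) = true then (k, v) else p) = rs := by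
  induction rs with
  | nil => rfl
  | cons p rs ih =>
    simp only [List.map_cons, List.mem_cons, not_or] at h ⊢
    rcases h with ⟨h1, h2⟩
    rw [ih h2]
    simp [show ¬ (p.1 = k) from fun hk => h1 (by simp [hk])]

theorem contains_mk_iff (ps : List (Int × Int)) (k : Int) :
    (PySem.Dict.mk ps).contains k = true ↔ k ∈ ps.map Prod.fst := by
  rw [PySem.Dict.contains_mk]
  simp [List.any_eq_true]

-- modify on a dict whose last entry holds the (fresh, unique-keyed) key k: bump that entry.
theorem modify_last (rs : List (Int × Int)) (k : Int) (c : Int)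
    (hnd : (rs.map Prod.fst).Nodup) (h : k ∉ rs.map Prod.fst) :
    (PySem.Dict.mk (rs ++ [(k, c)])).modify k 0 (· + 1) = PySem.Dict.mk (rs ++ [(k, c + 1)]) := by
  have hkeys : (PySem.Dict.mk (rs ++ [(k, c)])).keys.Nodup := by
    rw [PySem.Dict.keys_mk, List.map_append, List.nodup_append]
    refine ⟨hnd, by simp, ?_⟩
    intro y hy z hz
    rw [List.map_cons, List.map_nil, List.mem_singleton] at hz
    subst hz
    intro he; subst he; exact h hy
  have hc : (PySem.Dict.mk (rs ++ [(k, c)])).contains k = true := by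
    rw [contains_mk_iff]; simp
  have hget : (PySem.Dict.mk (rs ++ [(k, c)])).getD k 0 = c :=
    PySem.Dict.getD_of_mem_items _ (by simp) hkeys 0
  show (PySem.Dict.mk (rs ++ [(k, c)])).insert k _ = _
  apply PySem.Dict.ext
  rw [PySem.Dict.items_insert_of_contains _ _ hc, hget]
  show (rs ++ [(k, c)]).map _ = rs ++ [(k, c + 1)]
  rw [List.map_append, map_overwrite_id rs k _ h]
  simp

-- main invariant for A's first loop: it computes exactly the run decomposition,
-- failing iff some value occurs in two different runs.
theorem listLoop_spec (xs : List Int) :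
    ∀ (rs : List (Int × Int)) (prev : Int) (c : Int),
      (rs.map Prod.fst ++ [prev]).Nodup →
      listLoop prev xs (PySem.Dict.mk (rs ++ [(prev, c)])) =
        (if (rs.map Prod.fst ++ (runsAux prev c xs).map Prod.fst).Nodup
         then some (PySem.Dict.mk (rs ++ runsAux prev c xs)) else none) := by
  induction xs with
  | nil =>
    intro rs prev c h
    simp [listLoop, runsAux, h]
  | cons x xs ih =>
    intro rs prev c h
    have hnd : (rs.map Prod.fst).Nodup := (List.nodup_append.mp h).1
    have hpnotin : prev ∉ rs.map Prod.fst := by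
      have hdisj := (List.nodup_append.mp h).2.2
      intro hmem; exact hdisj prev hmem prev (by simp) rfl
    by_cases hxp : x = prev
    · subst hxp
      have hcont : (PySem.Dict.mk (rs ++ [(x, c)])).contains x = true := by
        rw [contains_mk_iff]; simp
      simp only [listLoop, runsAux, hcont, Bool.true_eq_false, if_false, if_true]
      rw [modify_last rs x c hnd hpnotin]
      exact ih rs x (c + 1) h
    · by_cases hxin : x ∈ rs.map Prod.fst
      · have hcont : (PySem.Dict.mk (rs ++ [(prev, c)])).contains x = true := by
          rw [contains_mk_iff]; simp [hxin]
        simp only [listLoop, hcont, Bool.true_eq_false, if_false]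
        rw [if_neg hxp]
        have hnotnodup :
            ¬ (rs.map Prod.fst ++ (runsAux prev c (x :: xs)).map Prod.fst).Nodup := by
          simp only [runsAux, if_neg hxp, List.map_cons]
          intro hcontra
          have hdisj := (List.nodup_append.mp hcontra).2.2
          exact hdisj x hxin x (by simp [runsAux_fst_mem]) rfl
        rw [if_neg hnotnodup]
      · have hcont : (PySem.Dict.mk (rs ++ [(prev, c)])).contains x = false := by
          rw [Bool.eq_false_iff]
          intro hcmem
          have hmem := (contains_mk_iff _ _).mp hcmem
          simp only [List.map_append, List.map_cons, List.map_nil, List.mem_append,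
            List.mem_singleton] at hmem
          rcases hmem with hmem | hmem
          · exact hxin hmem
          · exact hxp hmem
        have hins : (PySem.Dict.mk (rs ++ [(prev, c)])).insert x 1 =
            PySem.Dict.mk ((rs ++ [(prev, c)]) ++ [(x, 1)]) := by
          apply PySem.Dict.ext
          rw [PySem.Dict.items_insert_of_not_contains _ _ hcont]
        have hnd' : ((rs ++ [(prev, c)]).map Prod.fst ++ [x]).Nodup := by
          rw [List.nodup_append]
          refine ⟨by simpa using h, by simp, ?_⟩
          intro y hy z hz
          rw [List.mem_singleton] at hz
          subst hz
          intro he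
          subst he
          simp only [List.map_append, List.map_cons, List.map_nil, List.mem_append,
            List.mem_singleton] at hy
          rcases hy with hy | hy
          · exact hxin hy
          · exact hxp hy
        simp only [listLoop, hcont, if_true]
        rw [hins, ih ((rs ++ [(prev, c)])) x 1 hnd']
        simp only [runsAux, if_neg hxp, List.map_append, List.map_cons, List.map_nil,
          List.append_assoc, List.cons_append, List.nil_append]

theorem loop2_spec (d : PySem.Dict Int Int) (ks : List Int) :
    ∀ done : List Int, done.Nodup →
      chefrecpLoop2 d ks done =
        (if (done ++ ks.map (fun k => d.getD k 0)).Nodup then "YES" else "NO") := by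
  induction ks with
  | nil => intro done h; simp [chefrecpLoop2, h]
  | cons k ks ih =>
    intro done h
    by_cases hc : d.getD k 0 ∈ done
    · simp only [chefrecpLoop2, if_pos hc, List.map_cons]
      rw [if_neg]
      intro hcontra
      have hdisj := (List.nodup_append.mp hcontra).2.2
      exact hdisj _ hc _ (by simp) rfl
    · simp only [chefrecpLoop2, if_neg hc, List.map_cons]
      rw [ih (done ++ [d.getD k 0]) (by
        rw [List.nodup_append]
        refine ⟨h, by simp, ?_⟩
        intro y hy z hz
        rw [List.mem_singleton] at hz
        subst hz
        intro he
        subst he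
        exact hc hy)]
      simp [List.append_assoc]

theorem set_len_iff (l : List Int) :
    (PySem.Set.ofList l).length = l.length ↔ l.Nodup := by
  constructor
  · intro hlen
    have hperm : (PySem.Set.ofList l).Perm l.dedup := by
      rw [List.perm_ext_iff_of_nodup (PySem.Set.nodup_ofList l) l.nodup_dedup]
      intro x
      rw [PySem.Set.mem_ofList, List.mem_dedup]
    have hdl : l.dedup.length = l.length := by
      rw [← hperm.length_eq]; exact hlen
    have hds : l.dedup = l := (l.dedup_sublist).eq_of_length hdl
    rw [← hds]; exact l.nodup_dedup
  · intro hnd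
    rw [PySem.Set.ofList_eq_self_of_nodup l hnd]

theorem getD_runs (rs : List (Int × Int)) (h : (rs.map Prod.fst).Nodup) :
    rs.map (fun p => (PySem.Dict.mk rs).getD p.1 0) = rs.map Prod.snd := by
  apply List.map_congr_left
  intro p hp
  exact PySem.Dict.getD_of_mem_items _ (by simpa using hp) (by rw [PySem.Dict.keys_mk]; exact h) 0

theorem bridge (a : List Int) (n : Int) :
    ∀ (m : Nat) (j : Int), (n - j).toNat = m → ∀ d,
      chefrecpLoop1 a (PySem.List.pyRange j n 1) d =
        listLoop ((PySem.List.pyGet? a (j - 1)).getD 0)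
          ((PySem.List.pyRange j n 1).map (fun i => (PySem.List.pyGet? a i).getD 0)) d := by
  intro m
  induction m with
  | zero =>
    intro j hm d
    have hj : n ≤ j := by omega
    simp [pysem, hj, chefrecpLoop1, listLoop]
  | succ m ih =>
    intro j hm d
    have hj : j < n := by omega
    rw [PySem.List.pyRange_one_cons hj]
    simp only [List.map_cons, chefrecpLoop1, listLoop]
    by_cases hc : d.contains ((PySem.List.pyGet? a j).getD 0) = false
    · rw [if_pos hc, if_pos hc]
      have hb := ih (j + 1) (by omega) (d.insert ((PySem.List.pyGet? a j).getD 0) 1)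
      simpa using hb
    · rw [if_neg hc, if_neg hc]
      by_cases he : (PySem.List.pyGet? a j).getD 0 = (PySem.List.pyGet? a (j - 1)).getD 0
      · rw [if_pos he, if_pos he]
        have hb := ih (j + 1) (by omega) (d.modify ((PySem.List.pyGet? a j).getD 0) 0 (· + 1))
        simpa using hb
      · rw [if_neg he, if_neg he]

-- first loop on range(n), 0 < n: directly the run decomposition of the fetched values
theorem loop1_runs (a : List Int) (n : Int) (hn : (0 : Int) < n) :
    chefrecpLoop1 a (PySem.List.pyRange 0 n 1) PySem.Dict.empty =
      (if ((runsAux ((PySem.List.pyGet? a 0).getD 0) 1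
            ((PySem.List.pyRange 1 n 1).map (fun i => (PySem.List.pyGet? a i).getD 0))).map Prod.fst).Nodup
       then some (PySem.Dict.mk (runsAux ((PySem.List.pyGet? a 0).getD 0) 1
            ((PySem.List.pyRange 1 n 1).map (fun i => (PySem.List.pyGet? a i).getD 0))))
       else none) := by
  have hcons : PySem.List.pyRange 0 n 1 = 0 :: PySem.List.pyRange 1 n 1 := by
    simpa using PySem.List.pyRange_one_cons hn
  rw [hcons]
  simp only [chefrecpLoop1]
  rw [if_pos (by simp)]
  have hb := bridge a n ((n - 1).toNat) 1 rfl
    ((PySem.Dict.empty : PySem.Dict Int Int).insert ((PySem.List.pyGet? a 0).getD 0) 1)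
  norm_num at hb
  rw [hb]
  have hins : (PySem.Dict.empty : PySem.Dict Int Int).insert ((PySem.List.pyGet? a 0).getD 0) 1 =
      PySem.Dict.mk ([] ++ [((PySem.List.pyGet? a 0).getD 0, 1)]) := rfl
  rw [hins, listLoop_spec _ [] ((PySem.List.pyGet? a 0).getD 0) 1 (by simp)]
  simp

-- ===== VERDICT (by name: the statement is the Claim_ definition above) =====
theorem chefrecp_spec : Claim_equal_chefrecp := by
  intro n a _hdom _hpre
  unfold Spec_chefrecp
  by_cases hn : n ≤ 0
  · have hnil : PySem.List.pyRange 0 n 1 = [] := by simp [pysem, hn]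
    simp [chefrecp, chefrecp_alt, hnil, chefrecpLoop1, chefrecpLoop2, pyGroupRuns,
      PySem.Set.ofList, PySem.Set.empty, PySem.Dict.keys, PySem.Dict.empty]
  · have hn' : (0 : Int) < n := by omega
    have hcons : PySem.List.pyRange 0 n 1 = 0 :: PySem.List.pyRange 1 n 1 := by
      simpa using PySem.List.pyRange_one_cons hn'
    have hBruns : chefrecp_alt n a =
        (if (PySem.Set.ofList ((runsAux ((PySem.List.pyGet? a 0).getD 0) 1
              ((PySem.List.pyRange 1 n 1).map (fun i => (PySem.List.pyGet? a i).getD 0))).map Prod.fst)).length ≠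
            ((runsAux ((PySem.List.pyGet? a 0).getD 0) 1
              ((PySem.List.pyRange 1 n 1).map (fun i => (PySem.List.pyGet? a i).getD 0))).map Prod.fst).length ∨
            (PySem.Set.ofList ((runsAux ((PySem.List.pyGet? a 0).getD 0) 1
              ((PySem.List.pyRange 1 n 1).map (fun i => (PySem.List.pyGet? a i).getD 0))).map Prod.snd)).length ≠
            ((runsAux ((PySem.List.pyGet? a 0).getD 0) 1
              ((PySem.List.pyRange 1 n 1).map (fun i => (PySem.List.pyGet? a i).getD 0))).map Prod.snd).length
         then "NO" else "YES") := by
      simp only [chefrecp_alt, hcons, List.map_cons, pyGroupRuns]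
    unfold chefrecp
    rw [loop1_runs a n hn', hBruns]
    set R := runsAux ((PySem.List.pyGet? a 0).getD 0) 1
      ((PySem.List.pyRange 1 n 1).map (fun i => (PySem.List.pyGet? a i).getD 0)) with hR
    by_cases hv : (R.map Prod.fst).Nodup
    · rw [if_pos hv]
      have hkeys : (PySem.Dict.mk R).keys = R.map Prod.fst := by
        rw [PySem.Dict.keys_mk]
      show chefrecpLoop2 (PySem.Dict.mk R) (PySem.Dict.mk R).keys [] = _
      rw [hkeys, loop2_spec (PySem.Dict.mk R) (R.map Prod.fst) [] List.nodup_nil,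
        List.nil_append, List.map_map]
      have hcomp : ((fun k => (PySem.Dict.mk R).getD k 0) ∘ Prod.fst) =
          (fun p : Int × Int => (PySem.Dict.mk R).getD p.1 0) := rfl
      rw [hcomp, getD_runs R hv]
      have e1 : (PySem.Set.ofList (R.map Prod.fst)).length = (R.map Prod.fst).length :=
        (set_len_iff _).mpr hv
      by_cases hl : (R.map Prod.snd).Nodup
      · rw [if_pos hl, if_neg]
        push Not
        exact ⟨e1, (set_len_iff _).mpr hl⟩
      · rw [if_neg hl, if_pos]
        right
        intro hcontra
        exact hl ((set_len_iff _).mp hcontra)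
    · rw [if_neg hv, if_pos]
      left
      intro hcontra
      exact hv ((set_len_iff _).mp hcontra)
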